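-- pv_equiv track=rewrite | github.com/Mic-Toc/Ex6 | moogle.py | split_text_to_words
-- ===== SOURCE A (Python) =====
-- def split_text_to_words(text: str):
--
--     no_new_line_list = text.split("\n")
--     no_new_line_str = ""
--
--     for elem in no_new_line_list:
--         no_new_line_str += elem
--
--     no_tabs_list = no_new_line_str.split("\t")
--     no_tabs_str = ""
--
--     for part in no_tabs_list:
--         no_tabs_str += part
--
--     no_spaces_list = no_tabs_str.split(" ")
--
--     return no_spaces_list
-- ===== SOURCE B (Python) =====
-- def split_text_to_words(text: str):
--     result = []
--     current = ""
--     for ch in text: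
--         if ch == "\n" or ch == "\t":
--             continue
--         elif ch == " ":
--             result.append(current)
--             current = ""
--         else:
--             current += ch
--     result.append(current)
--     return result
-- ===== Notes on version B (the rewrite author's own statement) =====
-- stated objective: alternative
-- what changed: Replaced A's three sequential split/concatenate passes (split on newline, rebuild, split on tab, rebuild, split on space) with a single linear character scan that drops newlines/tabs, flushes the current buffer on each space, and builds the token list directly.
import Mathlib
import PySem

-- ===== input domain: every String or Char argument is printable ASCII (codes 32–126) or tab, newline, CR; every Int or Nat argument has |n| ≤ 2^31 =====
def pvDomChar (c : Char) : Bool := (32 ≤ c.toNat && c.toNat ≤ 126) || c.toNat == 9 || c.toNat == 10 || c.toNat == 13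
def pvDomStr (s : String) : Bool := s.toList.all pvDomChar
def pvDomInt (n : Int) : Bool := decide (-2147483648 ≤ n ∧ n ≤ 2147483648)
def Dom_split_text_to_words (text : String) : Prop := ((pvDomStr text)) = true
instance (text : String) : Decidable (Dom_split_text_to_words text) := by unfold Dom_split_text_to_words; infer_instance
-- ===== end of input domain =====

-- B replaces A's three split/concat passes by one linear scan that builds the word list directly (alternative decomposition, not claimed faster).

-- ===== PORT A =====
-- A works on Python strings; ported over List Char (PySem.Chars.splitOn is s.split(sep)),
-- with String.ofList restoring the strings at the end.  The two '+=' concatenation loops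
-- are the foldl's over (· ++ ·).
def split_text_to_words (text : String) : List String :=
  let no_new_line_list := PySem.Chars.splitOn text.toList ['\n']
  let no_new_line_str := no_new_line_list.foldl (· ++ ·) []
  let no_tabs_list := PySem.Chars.splitOn no_new_line_str ['\t']
  let no_tabs_str := no_tabs_list.foldl (· ++ ·) []
  let no_spaces_list := PySem.Chars.splitOn no_tabs_str [' ']
  no_spaces_list.map String.ofList

-- ===== PORT B =====
-- the scanner: result list `res`, current word buffer `cur` (chars in order, as Python's current += ch)
def pvAltGo : List Char → List (List Char) → List Char → List (List Char)
  | [], res, cur => res ++ [cur]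
  | ch :: rest, res, cur =>
      if ch = '\n' ∨ ch = '\t' then pvAltGo rest res cur
      else if ch = ' ' then pvAltGo rest (res ++ [cur]) []
      else pvAltGo rest res (cur ++ [ch])

def split_text_to_words_alt (text : String) : List String :=
  (pvAltGo text.toList [] []).map String.ofList

-- ===== PRECONDITION & SPEC =====
def Spec_split_text_to_words (text : String) (out : List String) : Prop := out = split_text_to_words_alt text
instance (text : String) (out : List String) : Decidable (Spec_split_text_to_words text out) := by unfold Spec_split_text_to_words; infer_instance

-- ===== CLAIM (what is proved, stated in full; the proofs are below) =====
def Claim_equal_split_text_to_words : Prop := ∀ (text : String), Dom_split_text_to_words text → Spec_split_text_to_words text (split_text_to_words text)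

-- ===== LEMMAS AND PROOFS =====

-- a simple specification of splitting on ONE character: cur is the reversed buffer
def pvSp (c : Char) : List Char → List Char → List (List Char)
  | [], cur => [cur.reverse]
  | a :: rest, cur => if a = c then cur.reverse :: pvSp c rest [] else pvSp c rest (a :: cur)

theorem pvGo_spec (c : Char) (l : List Char) : ∀ (fuel : Nat) (cur : List Char) (acc : List (List Char)),
    l.length ≤ fuel →
    PySem.Chars.splitOn.go [c] fuel l cur acc = acc.reverse ++ pvSp c l cur := by
  induction l with
  | nil =>
      intro fuel cur acc _
      cases fuel <;> simp [PySem.Chars.splitOn.go, pvSp]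
  | cons a rest ih =>
      intro fuel cur acc h
      cases fuel with
      | zero => simp at h
      | succ f =>
          have hr : rest.length ≤ f := by simpa using Nat.lt_succ_iff.mp (by simpa using h)
          by_cases hc : c = a
          · subst hc
            rw [show PySem.Chars.splitOn.go [c] (f+1) (c::rest) cur acc
                  = PySem.Chars.splitOn.go [c] f rest [] (cur.reverse :: acc) from by
                simp [PySem.Chars.splitOn.go, List.isPrefixOf]]
            rw [ih f [] (cur.reverse :: acc) hr]
            simp [pvSp]
          · have hac : a ≠ c := fun h' => hc h'.symm
            rw [show PySem.Chars.splitOn.go [c] (f+1) (a::rest) cur acc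
                  = PySem.Chars.splitOn.go [c] f rest (a :: cur) acc from by
                simp [PySem.Chars.splitOn.go, List.isPrefixOf, hc]]
            rw [ih f (a :: cur) acc hr]
            simp [pvSp, hac]

theorem pvSplitOn_eq (c : Char) (s : List Char) :
    PySem.Chars.splitOn s [c] = pvSp c s [] := by
  have := pvGo_spec c s (s.length + 1) [] [] (by omega)
  simpa [PySem.Chars.splitOn] using this

theorem pvSp_flatten (c : Char) (l : List Char) : ∀ (cur : List Char),
    (pvSp c l cur).flatten = cur.reverse ++ l.filter (fun x => x ≠ c) := by
  induction l with
  | nil => intro cur; simp [pvSp]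
  | cons a rest ih =>
      intro cur
      by_cases h : a = c
      · subst h; simp [pvSp, ih]
      · simp [pvSp, h, ih]

theorem pvFoldl_append (xs : List (List Char)) : ∀ (acc : List Char),
    xs.foldl (· ++ ·) acc = acc ++ xs.flatten := by
  induction xs with
  | nil => simp
  | cons x xs ih => intro acc; simp [List.foldl_cons, ih]

theorem pvAltGo_spec (l : List Char) : ∀ (res : List (List Char)) (cur : List Char),
    pvAltGo l res cur =
      res ++ pvSp ' ' (((l.filter (fun x => x ≠ '\n')).filter (fun x => x ≠ '\t'))) cur.reverse := by
  induction l with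
  | nil => intro res cur; simp [pvAltGo, pvSp]
  | cons ch rest ih =>
      intro res cur
      by_cases h1 : ch = '\n'
      · subst h1; simp [pvAltGo, ih]
      · by_cases h2 : ch = '\t'
        · subst h2; simp [pvAltGo, ih]
        · by_cases h3 : ch = ' '
          · subst h3
            simp [pvAltGo, h1, h2, ih, pvSp]
          · simp [pvAltGo, h1, h2, h3, ih, pvSp]

-- ===== VERDICT (by name: the statement is the Claim_ definition above) =====
theorem split_text_to_words_spec : Claim_equal_split_text_to_words := by
  intro text _
  unfold Spec_split_text_to_words split_text_to_words split_text_to_words_alt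
  simp only [pvSplitOn_eq, pvFoldl_append, List.nil_append, pvSp_flatten, List.reverse_nil,
    pvAltGo_spec, List.nil_append]
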